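-- pv_equiv track=rewrite | github.com/masadi-99/thp | hash_matcher.py | categorize_procedure
-- ===== SOURCE A (Python) =====
-- def categorize_procedure(description: str) -> str:
--     """Categorize procedures"""
--     desc_lower = description.lower()
--
--     if any(word in desc_lower for word in ['insulin', 'glucose', 'diabetic', 'metformin']):
--         return 'Diabetes'
--     elif any(word in desc_lower for word in ['mri', 'ct scan', 'ct ', 'x-ray', 'ultrasound', 'imaging', 'scan']):
--         return 'Imaging'
--     elif any(word in desc_lower for word in ['surgery', 'surgical', 'operation', 'procedure']):
--         return 'Surgery'
--     elif any(word in desc_lower for word in ['lab', 'test', 'blood', 'analysis', 'panel', 'culture']):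
--         return 'Laboratory'
--     elif any(word in desc_lower for word in ['vaccine', 'immunization', 'vaccination']):
--         return 'Vaccines'
--     elif any(word in desc_lower for word in ['antibiotic', 'medication', 'drug', 'tablet', 'capsule', 'injection']):
--         return 'Medications'
--     elif any(word in desc_lower for word in ['cardiology', 'cardiac', 'heart', 'ecg', 'ekg', 'echo']):
--         return 'Cardiology'
--     else:
--         return 'Other'
-- ===== SOURCE B (Python) =====
-- # B: exhaustive arg-min over one flat keyword->priority map (no per-category
-- # short-circuit ladder): find the minimum priority among all matching keywords.
-- KEYWORD_RANK = {
--     'insulin': 0, 'glucose': 0, 'diabetic': 0, 'metformin': 0,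
--     'mri': 1, 'ct scan': 1, 'ct ': 1, 'x-ray': 1, 'ultrasound': 1, 'imaging': 1, 'scan': 1,
--     'surgery': 2, 'surgical': 2, 'operation': 2, 'procedure': 2,
--     'lab': 3, 'test': 3, 'blood': 3, 'analysis': 3, 'panel': 3, 'culture': 3,
--     'vaccine': 4, 'immunization': 4, 'vaccination': 4,
--     'antibiotic': 5, 'medication': 5, 'drug': 5, 'tablet': 5, 'capsule': 5, 'injection': 5,
--     'cardiology': 6, 'cardiac': 6, 'heart': 6, 'ecg': 6, 'ekg': 6, 'echo': 6,
-- }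
-- NAMES = ['Diabetes', 'Imaging', 'Surgery', 'Laboratory', 'Vaccines',
--          'Medications', 'Cardiology', 'Other']
--
-- def categorize_procedure(description: str) -> str:
--     """Categorize procedures: arg-min priority over all matching keywords."""
--     desc_lower = description.lower()
--     best = min((rank for word, rank in KEYWORD_RANK.items() if word in desc_lower),
--                default=len(NAMES) - 1)
--     return NAMES[best]
-- ===== Notes on version B (the rewrite author's own statement) =====
-- stated objective: alternative
-- what changed: Replaced the short-circuit seven-branch ladder with an exhaustive arg-min: one flat keyword-to-priority map is scanned in full, the minimum priority among matching keywords is taken, and a name table is indexed by it.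
import Mathlib
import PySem

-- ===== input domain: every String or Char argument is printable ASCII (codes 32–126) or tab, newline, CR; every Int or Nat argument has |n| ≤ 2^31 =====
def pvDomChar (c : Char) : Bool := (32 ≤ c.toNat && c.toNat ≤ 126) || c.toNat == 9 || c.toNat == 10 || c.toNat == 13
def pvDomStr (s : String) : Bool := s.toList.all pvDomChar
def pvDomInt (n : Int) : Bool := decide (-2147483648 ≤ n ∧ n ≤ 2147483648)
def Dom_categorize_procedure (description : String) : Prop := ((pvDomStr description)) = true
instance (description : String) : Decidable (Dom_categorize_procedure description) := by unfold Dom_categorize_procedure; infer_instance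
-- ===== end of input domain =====

-- B replaces the short-circuit branch ladder with an exhaustive arg-min over one flat keyword->priority map, then indexes a name table; equivalent by design, proved below.


-- ===== PORT A =====
def categorize_procedure (description : String) : String :=
  let desc_lower := PySem.Str.lower description
  if (["insulin", "glucose", "diabetic", "metformin"].any (fun word => PySem.Str.isIn word desc_lower)) then "Diabetes"
  else if (["mri", "ct scan", "ct ", "x-ray", "ultrasound", "imaging", "scan"].any (fun word => PySem.Str.isIn word desc_lower)) then "Imaging"
  else if (["surgery", "surgical", "operation", "procedure"].any (fun word => PySem.Str.isIn word desc_lower)) then "Surgery"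
  else if (["lab", "test", "blood", "analysis", "panel", "culture"].any (fun word => PySem.Str.isIn word desc_lower)) then "Laboratory"
  else if (["vaccine", "immunization", "vaccination"].any (fun word => PySem.Str.isIn word desc_lower)) then "Vaccines"
  else if (["antibiotic", "medication", "drug", "tablet", "capsule", "injection"].any (fun word => PySem.Str.isIn word desc_lower)) then "Medications"
  else if (["cardiology", "cardiac", "heart", "ecg", "ekg", "echo"].any (fun word => PySem.Str.isIn word desc_lower)) then "Cardiology"
  else "Other"

-- ===== PORT B =====
-- B: one flat keyword -> priority map; the answer is the name at the minimum
-- priority among all matching keywords (default = index of 'Other').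
def pvKeywordRank : List (String × Nat) :=
  [("insulin", 0), ("glucose", 0), ("diabetic", 0), ("metformin", 0),
   ("mri", 1), ("ct scan", 1), ("ct ", 1), ("x-ray", 1), ("ultrasound", 1), ("imaging", 1), ("scan", 1),
   ("surgery", 2), ("surgical", 2), ("operation", 2), ("procedure", 2),
   ("lab", 3), ("test", 3), ("blood", 3), ("analysis", 3), ("panel", 3), ("culture", 3),
   ("vaccine", 4), ("immunization", 4), ("vaccination", 4),
   ("antibiotic", 5), ("medication", 5), ("drug", 5), ("tablet", 5), ("capsule", 5), ("injection", 5),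
   ("cardiology", 6), ("cardiac", 6), ("heart", 6), ("ecg", 6), ("ekg", 6), ("echo", 6)]

def pvNames : List String :=
  ["Diabetes", "Imaging", "Surgery", "Laboratory", "Vaccines", "Medications", "Cardiology", "Other"]

-- min over the filtered ranks with default = 7, as a single fold over the map
def categorize_procedure_alt (description : String) : String :=
  let desc_lower := PySem.Str.lower description
  let best := pvKeywordRank.foldl
    (fun acc p => if PySem.Str.isIn p.1 desc_lower then min acc p.2 else acc)
    (pvNames.length - 1)
  pvNames.getD best "Other"

-- ===== PRECONDITION & SPEC =====
def Spec_categorize_procedure (description : String) (out : String) : Prop := out = categorize_procedure_alt description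
instance (description : String) (out : String) : Decidable (Spec_categorize_procedure description out) := by unfold Spec_categorize_procedure; infer_instance

-- ===== CLAIM (what is proved, stated in full; the proofs are below) =====
def Claim_equal_categorize_procedure : Prop := ∀ (description : String), Dom_categorize_procedure description → Spec_categorize_procedure description (categorize_procedure description)

-- ===== LEMMAS AND PROOFS =====

-- folding min over one priority group collapses to a single `any` test
theorem pvGroupFold (d : String) (words : List String) (r acc : Nat) :
    List.foldl (fun acc p => if PySem.Str.isIn p.1 d then min acc p.2 else acc) acc
      (words.map (fun w => (w, r)))
    = if words.any (fun word => PySem.Str.isIn word d) then min acc r else acc := by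
  induction words generalizing acc with
  | nil => simp
  | cons w ws ih =>
    simp only [List.map_cons, List.foldl_cons, List.any_cons]
    by_cases h : PySem.Str.isIn w d = true
    · simp only [h, Bool.true_or, if_true, ih]
      by_cases h2 : ws.any (fun word => PySem.Str.isIn word d) = true <;>
        simp only [h2, if_true, if_false, Bool.false_eq_true, Nat.min_assoc, Nat.min_self]
    · rw [Bool.not_eq_true] at h
      simp only [h, Bool.false_or, Bool.false_eq_true, if_false, ih]

-- the flat map is the concatenation of the seven priority groups
theorem pvKeywordRank_split : pvKeywordRank =
    (["insulin", "glucose", "diabetic", "metformin"].map (fun w => (w, 0)))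
    ++ (["mri", "ct scan", "ct ", "x-ray", "ultrasound", "imaging", "scan"].map (fun w => (w, 1)))
    ++ (["surgery", "surgical", "operation", "procedure"].map (fun w => (w, 2)))
    ++ (["lab", "test", "blood", "analysis", "panel", "culture"].map (fun w => (w, 3)))
    ++ (["vaccine", "immunization", "vaccination"].map (fun w => (w, 4)))
    ++ (["antibiotic", "medication", "drug", "tablet", "capsule", "injection"].map (fun w => (w, 5)))
    ++ (["cardiology", "cardiac", "heart", "ecg", "ekg", "echo"].map (fun w => (w, 6))) := rfl

-- ===== VERDICT (by name: the statement is the Claim_ definition above) =====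
theorem categorize_procedure_spec : Claim_equal_categorize_procedure := by
  intro description _
  unfold Spec_categorize_procedure categorize_procedure categorize_procedure_alt
  rw [pvKeywordRank_split]
  simp only [List.foldl_append, pvGroupFold, pvNames, List.length_cons, List.length_nil]
  generalize (["insulin", "glucose", "diabetic", "metformin"].any (fun word => PySem.Str.isIn word (PySem.Str.lower description))) = b1
  generalize (["mri", "ct scan", "ct ", "x-ray", "ultrasound", "imaging", "scan"].any (fun word => PySem.Str.isIn word (PySem.Str.lower description))) = b2
  generalize (["surgery", "surgical", "operation", "procedure"].any (fun word => PySem.Str.isIn word (PySem.Str.lower description))) = b3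
  generalize (["lab", "test", "blood", "analysis", "panel", "culture"].any (fun word => PySem.Str.isIn word (PySem.Str.lower description))) = b4
  generalize (["vaccine", "immunization", "vaccination"].any (fun word => PySem.Str.isIn word (PySem.Str.lower description))) = b5
  generalize (["antibiotic", "medication", "drug", "tablet", "capsule", "injection"].any (fun word => PySem.Str.isIn word (PySem.Str.lower description))) = b6
  generalize (["cardiology", "cardiac", "heart", "ecg", "ekg", "echo"].any (fun word => PySem.Str.isIn word (PySem.Str.lower description))) = b7
  cases b1 <;> cases b2 <;> cases b3 <;> cases b4 <;> cases b5 <;> cases b6 <;> cases b7 <;> rfl
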